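-- pv_equiv track=rewrite | github.com/MakiDevelop/dataset-workbench | src/generators/csv_generator.py | member_level_from_id
-- ===== SOURCE A (Python) =====
-- def member_level_from_id(member_id: str) -> str:
--     # Deterministic-ish mapping for repeatability
--     h = sum(ord(c) for c in member_id) % 100
--     if h < 55:
--         return "bronze"
--     if h < 80:
--         return "silver"
--     if h < 95:
--         return "gold"
--     return "vip"
-- ===== SOURCE B (Python) =====
-- def member_level_from_id(member_id: str) -> str:
--     # Single pass with a running modular accumulator (never builds the full sum),
--     # then a hand-written binary search over the sorted tier thresholds.
--     h = 0
--     for c in member_id: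
--         h = (h + ord(c)) % 100
--     thresholds = [55, 80, 95]
--     labels = ["bronze", "silver", "gold", "vip"]
--     lo, hi = 0, len(thresholds)
--     while lo < hi:
--         mid = (lo + hi) // 2
--         if h < thresholds[mid]:
--             hi = mid
--         else:
--             lo = mid + 1
--     return labels[lo]
-- ===== Notes on version B (the rewrite author's own statement) =====
-- stated objective: alternative
-- what changed: Replaces sum-then-mod plus a 4-branch if-cascade by a single pass keeping a running (h + ord(c)) % 100 accumulator and selecting the tier by a binary search (bisect_right loop) over a sorted threshold list with a parallel label list.
import Mathlib
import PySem

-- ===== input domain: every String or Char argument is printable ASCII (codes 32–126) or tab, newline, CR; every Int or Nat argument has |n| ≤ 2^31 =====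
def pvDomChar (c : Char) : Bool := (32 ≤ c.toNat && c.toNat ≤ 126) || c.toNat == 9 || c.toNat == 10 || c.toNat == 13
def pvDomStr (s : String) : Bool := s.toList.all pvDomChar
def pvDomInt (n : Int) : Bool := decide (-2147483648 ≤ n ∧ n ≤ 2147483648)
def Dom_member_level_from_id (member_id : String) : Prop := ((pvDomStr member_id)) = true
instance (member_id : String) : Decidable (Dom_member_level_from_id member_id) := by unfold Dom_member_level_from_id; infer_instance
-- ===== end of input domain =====

-- ===== PORT A =====
-- Port of A: whole char-sum, mod 100 once, then the 4-branch if-cascade.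
def member_level_from_id (member_id : String) : String :=
  let h : Int := PySem.Int.mod (member_id.toList.foldl (fun a c => a + (c.toNat : Int)) 0) 100
  if h < 55 then "bronze"
  else if h < 80 then "silver"
  else if h < 95 then "gold"
  else "vip"

-- ===== PORT B =====
-- Port of B's while-loop binary search (lo/hi shrink; terminates since hi - lo decreases).
def pvBisectLoop (thresholds : List Int) (h : Int) (lo hi : Nat) : Nat :=
  if _hlt : lo < hi then
    let mid := (lo + hi) / 2
    if h < thresholds.getD mid 0 then pvBisectLoop thresholds h lo mid
    else pvBisectLoop thresholds h (mid + 1) hi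
  else lo
termination_by hi - lo
decreasing_by all_goals omega

-- Port of B: running (h + ord c) % 100 accumulator, then binary search over the thresholds.
def member_level_from_id_alt (member_id : String) : String :=
  let h : Int := member_id.toList.foldl (fun a c => PySem.Int.mod (a + (c.toNat : Int)) 100) 0
  let thresholds : List Int := [55, 80, 95]
  let labels : List String := ["bronze", "silver", "gold", "vip"]
  labels.getD (pvBisectLoop thresholds h 0 thresholds.length) "vip"

-- ===== PRECONDITION & SPEC =====
def Spec_member_level_from_id (member_id : String) (out : String) : Prop := out = member_level_from_id_alt member_id
instance (member_id : String) (out : String) : Decidable (Spec_member_level_from_id member_id out) := by unfold Spec_member_level_from_id; infer_instance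

-- ===== CLAIM =====
def Claim_equal_member_level_from_id : Prop := ∀ (member_id : String), Dom_member_level_from_id member_id → Spec_member_level_from_id member_id (member_level_from_id member_id)

-- ===== LEMMAS AND PROOFS =====
-- The running-mod accumulator equals mod of the whole sum (for any starting accumulator a).
theorem foldl_mod_eq (l : List Char) (a : Int) :
    l.foldl (fun a c => PySem.Int.mod (a + (c.toNat : Int)) 100) (PySem.Int.mod a 100)
      = PySem.Int.mod (l.foldl (fun a c => a + (c.toNat : Int)) a) 100 := by
  induction l generalizing a with
  | nil => rfl
  | cons c t ih =>
    simp only [List.foldl_cons]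
    rw [← ih (a + (c.toNat : Int))]
    congr 1
    rw [PySem.Int.mod_eq_emod_of_pos (by norm_num), PySem.Int.mod_eq_emod_of_pos (by norm_num),
        PySem.Int.mod_eq_emod_of_pos (by norm_num)]
    omega

-- The binary-search loop on the literal threshold list, fully unfolded.
theorem bisect_eval (h : Int) :
    pvBisectLoop [55, 80, 95] h 0 3
      = if h < 80 then (if h < 55 then 0 else 1) else (if h < 95 then 2 else 3) := by
  rw [pvBisectLoop]
  norm_num
  split_ifs with h80
  all_goals
    rw [pvBisectLoop]; norm_num
    split_ifs
    all_goals (rw [pvBisectLoop]; norm_num)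

-- ===== VERDICT =====
theorem member_level_from_id_spec : Claim_equal_member_level_from_id := by
  intro s _
  unfold Spec_member_level_from_id member_level_from_id member_level_from_id_alt
  have hf := foldl_mod_eq s.toList 0
  rw [show PySem.Int.mod (0 : Int) 100 = 0 from rfl] at hf
  dsimp only
  rw [hf, show ([55, 80, 95] : List Int).length = 3 from rfl, bisect_eval]
  split_ifs <;> simp_all <;> omega
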